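-- pv_equiv track=rewrite | github.com/pc5401/my_BOJ | 백준/Gold/1599. 민식어/민식어.py | key_minsik
-- ===== SOURCE A (Python) =====
-- order = {
--     "a": 0, "b": 1, "k": 2, "d": 3, "e": 4, "g": 5, "h": 6, "i": 7,
--     "l": 8, "m": 9, "n": 10, "ng": 11, "o": 12, "p": 13, "r": 14,
--     "s": 15, "t": 16, "u": 17, "w": 18, "y": 19
-- }
--
-- def key_minsik(word: str):
--     res = []
--     i = 0
--     while i < len(word):
--         if word[i] == 'n' and i + 1 < len(word) and word[i + 1] == 'g':
--             res.append(order["ng"])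
--             i += 2
--         else:
--             res.append(order[word[i]])
--             i += 1
--     return tuple(res)
-- ===== SOURCE B (Python) =====
-- order = {
--     "a": 0, "b": 1, "k": 2, "d": 3, "e": 4, "g": 5, "h": 6, "i": 7,
--     "l": 8, "m": 9, "n": 10, "ng": 11, "o": 12, "p": 13, "r": 14,
--     "s": 15, "t": 16, "u": 17, "w": 18, "y": 19
-- }
--
-- def key_minsik(word: str):
--     # pass 1: tokenize the word into 'ng' digraphs or single characters (slice-driven)
--     tokens = []
--     rest = word
--     while rest:
--         t = "ng" if rest[:2] == "ng" else rest[0]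
--         tokens.append(t)
--         rest = rest[len(t):]
--     # pass 2: uniform lookup of every token
--     return tuple(order[t] for t in tokens)
-- ===== Notes on version B (the rewrite author's own statement) =====
-- stated objective: idiomatic
-- what changed: Replaces A's fused index-advancing while-loop with a two-pass decomposition: a slice-driven tokenizer that splits the word into 'ng' digraphs or single characters, then a uniform order-lookup pass over the token list.
import Mathlib
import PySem

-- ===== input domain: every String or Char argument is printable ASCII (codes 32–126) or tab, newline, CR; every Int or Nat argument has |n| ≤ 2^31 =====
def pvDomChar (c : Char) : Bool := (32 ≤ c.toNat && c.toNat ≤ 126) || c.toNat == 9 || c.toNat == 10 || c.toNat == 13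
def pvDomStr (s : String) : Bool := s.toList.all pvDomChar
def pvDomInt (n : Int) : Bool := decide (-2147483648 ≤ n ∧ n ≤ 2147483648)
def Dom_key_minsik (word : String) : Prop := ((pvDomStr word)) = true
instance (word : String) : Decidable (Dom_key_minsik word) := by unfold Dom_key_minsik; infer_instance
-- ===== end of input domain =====

-- B changes the decomposition: a slice-driven tokenizer pass ('ng' digraph or single char)
-- followed by a uniform lookup pass, instead of A's fused index-advancing while-loop.

-- the single-letter entries of the `order` dict; Pre_ guarantees the default branch is never reached
def minsikOrd (c : Char) : Int :=
  if c = 'a' then 0 else if c = 'b' then 1 else if c = 'k' then 2 else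
  if c = 'd' then 3 else if c = 'e' then 4 else if c = 'g' then 5 else
  if c = 'h' then 6 else if c = 'i' then 7 else if c = 'l' then 8 else
  if c = 'm' then 9 else if c = 'n' then 10 else if c = 'o' then 12 else
  if c = 'p' then 13 else if c = 'r' then 14 else if c = 's' then 15 else
  if c = 't' then 16 else if c = 'u' then 17 else if c = 'w' then 18 else
  if c = 'y' then 19 else 0

-- ===== PORT A =====
-- A's while-loop over indices i, as structural recursion on the character list:
-- if word[i] == 'n' and i+1 < len(word) and word[i+1] == 'g' → append order["ng"]=11, i += 2;
-- else → append order[word[i]], i += 1.  (the [c] case is 'i+1 < len(word)' failing)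
def keyMinsikLoop : List Char → List Int
  | [] => []
  | [c] => [minsikOrd c]
  | c :: d :: rest =>
    if c = 'n' ∧ d = 'g' then 11 :: keyMinsikLoop rest
    else minsikOrd c :: keyMinsikLoop (d :: rest)

def key_minsik (word : String) : List Int := keyMinsikLoop word.toList

-- ===== PORT B =====
-- pass 1 of Source B: tokenize (token = "ng" if rest[:2] == "ng", else the single first char)
def minsikTokens : List Char → List (List Char)
  | 'n' :: 'g' :: rest => ['n', 'g'] :: minsikTokens rest
  | c :: rest => [c] :: minsikTokens rest
  | [] => []

-- pass 2 of Source B: order[t] for a token t ("ng" → 11, a single letter → its order entry)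
def minsikTokVal (t : List Char) : Int :=
  if t = ['n', 'g'] then 11
  else match t with
       | [c] => minsikOrd c
       | _ => 0

def key_minsik_alt (word : String) : List Int := (minsikTokens word.toList).map minsikTokVal

-- ===== PRECONDITION & SPEC =====
-- Pre_ excludes words containing a character outside the 19-letter Minsik alphabet,
-- on which A raises KeyError (B raises KeyError there too).
def Pre_key_minsik (word : String) : Prop :=
  (word.toList.all (fun c =>
    c ∈ ['a','b','k','d','e','g','h','i','l','m','n','o','p','r','s','t','u','w','y'])) = true
instance (word : String) : Decidable (Pre_key_minsik word) := by unfold Pre_key_minsik; infer_instance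
def pvWitness_key_minsik : String := "ngominsik"

def Spec_key_minsik (word : String) (out : List Int) : Prop := out = key_minsik_alt word
instance (word : String) (out : List Int) : Decidable (Spec_key_minsik word out) := by unfold Spec_key_minsik; infer_instance

-- ===== CLAIM (what is proved, stated in full; the proofs are below) =====
def Claim_equal_key_minsik : Prop := ∀ (word : String), Dom_key_minsik word → Pre_key_minsik word → Spec_key_minsik word (key_minsik word)

-- ===== LEMMAS AND PROOFS =====
theorem tokVal_single (c : Char) : minsikTokVal [c] = minsikOrd c := by
  simp [minsikTokVal]

theorem tokens_cons_of_not_ng (c d : Char) (rest : List Char) (h : ¬(c = 'n' ∧ d = 'g')) :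
    minsikTokens (c :: d :: rest) = [c] :: minsikTokens (d :: rest) := by
  rw [minsikTokens.eq_def]
  split
  · rename_i heq2
    injection heq2 with h1 h2; injection h2 with h3 _
    exact absurd ⟨h1, h3⟩ h
  · rename_i heq2
    injection heq2 with h1 h2
    subst h1; subst h2
    rfl
  · rename_i heq2
    exact absurd heq2 (by simp)

theorem keyMinsikLoop_eq_map_tokens (l : List Char) :
    keyMinsikLoop l = (minsikTokens l).map minsikTokVal := by
  fun_induction keyMinsikLoop l with
  | case1 => simp only [minsikTokens, List.map_nil]
  | case2 c =>
    rw [show minsikTokens [c] = [[c]] by simp only [minsikTokens], List.map_cons,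
        List.map_nil, tokVal_single]
  | case3 c d rest h ih =>
    obtain ⟨hc, hd⟩ := h; subst hc; subst hd
    rw [show minsikTokens ('n'::'g'::rest) = ['n','g'] :: minsikTokens rest from rfl,
        List.map_cons, ih]
    rfl
  | case4 c d rest h ih =>
    rw [tokens_cons_of_not_ng c d rest h, List.map_cons, ih, tokVal_single]

-- ===== VERDICT (by name: the statement is the Claim_ definition above) =====
theorem key_minsik_spec : Claim_equal_key_minsik := by
  intro word _ _
  unfold Spec_key_minsik key_minsik key_minsik_alt
  exact keyMinsikLoop_eq_map_tokens word.toList
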